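-- pv_equiv track=rewrite | github.com/NeapolitanIcecream/recoleta | recoleta/publish/trend_notes.py | _trend_tags
-- ===== SOURCE A (Python) =====
-- def _sanitize_obsidian_tag(value: str) -> str:
--     raw = str(value or "").strip()
--     if not raw:
--         return ""
--     normalized = "".join(
--         ch if (ch.isalnum() or ch in {"-", "_", "/"}) else "-" for ch in raw
--     )
--     while "--" in normalized:
--         normalized = normalized.replace("--", "-")
--     normalized = normalized.strip("-")
--     return normalized.lower()
--
-- def _trend_tags(topics: list[str]) -> list[str]:
--     tags = ["recoleta/trend"]
--     for topic in topics or []: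
--         normalized = _sanitize_obsidian_tag(topic)
--         if normalized:
--             tags.append(f"topic/{normalized}")
--     seen_tags: set[str] = set()
--     return [tag for tag in tags if not (tag in seen_tags or seen_tags.add(tag))]
-- ===== SOURCE B (Python) =====
-- from itertools import groupby
--
--
-- def _sanitize_obsidian_tag(value: str) -> str:
--     raw = str(value or "").strip()
--     if not raw:
--         return ""
--     allowed = lambda ch: ch.isalnum() or ch in {"_", "/"}
--     tokens = ("".join(g) for k, g in groupby(raw, key=allowed) if k)
--     return "-".join(tokens).lower()
--
--
-- def _trend_tags(topics: list[str]) -> list[str]: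
--     normalized = (_sanitize_obsidian_tag(topic) for topic in (topics or []))
--     tags = ["recoleta/trend"] + [f"topic/{n}" for n in normalized if n]
--     return list(dict.fromkeys(tags))
-- ===== Notes on version B (the rewrite author's own statement) =====
-- stated objective: idiomatic
-- what changed: Replaces A's per-char dash substitution followed by an iterated whole-string '--'.replace collapse loop and strip('-') with a single itertools.groupby run-grouping pass (keep allowed runs, join with '-'), and replaces the seen-set comprehension dedup with dict.fromkeys.
import Mathlib
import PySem

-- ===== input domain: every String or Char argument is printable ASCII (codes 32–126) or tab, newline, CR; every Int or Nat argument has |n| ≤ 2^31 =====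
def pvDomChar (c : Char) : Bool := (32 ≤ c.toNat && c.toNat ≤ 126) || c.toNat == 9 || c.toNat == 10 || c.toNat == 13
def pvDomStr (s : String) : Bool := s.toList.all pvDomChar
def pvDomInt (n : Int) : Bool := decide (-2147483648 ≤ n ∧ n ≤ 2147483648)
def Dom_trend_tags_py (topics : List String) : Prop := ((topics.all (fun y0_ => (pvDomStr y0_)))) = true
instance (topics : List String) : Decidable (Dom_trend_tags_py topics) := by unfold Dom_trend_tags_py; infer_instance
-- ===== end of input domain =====

-- B replaces A's per-char dash substitution + iterated '--'-collapse loop + strip('-') by a single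
-- run-grouping pass (tokenize allowed runs, join with '-'); objective: simpler/idiomatic, not faster.

-- ===== PORT A =====
-- ch.isalnum() or ch in {"-", "_", "/"}
def pvAllowedA (c : Char) : Bool := PySem.Chars.isalnum c || c = '-' || c = '_' || c = '/'

-- the conditional expression of A's generator: ch if allowed else "-"
def pvMapDash (c : Char) : Char := if pvAllowedA c then c else '-'

-- while "--" in s: s = s.replace("--", "-")   (fuel = length only for totality: each
-- replacement strictly shortens the string, so the loop stops before the fuel runs out)
def pvCollapseA : Nat → List Char → List Char
  | 0, s => s
  | fuel + 1, s =>
      if PySem.Chars.isIn ['-', '-'] s then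
        pvCollapseA fuel (PySem.Chars.replace s ['-', '-'] ['-'])
      else s

-- _sanitize_obsidian_tag, ported on List Char ('str(value or "")' is 'value' itself for a str argument)
def pvSanitizeA (value : String) : String :=
  let raw := (PySem.Str.strip value).toList
  if raw = [] then ""
  else
    let normalized := raw.map pvMapDash
    let collapsed := pvCollapseA normalized.length normalized
    String.ofList (PySem.Chars.lower (PySem.Chars.stripChars collapsed ['-']))

def trend_tags_py (topics : List String) : List String :=
  let tags := topics.foldl
    (fun tags topic =>
      if pvSanitizeA topic ≠ "" then tags ++ ["topic/" ++ pvSanitizeA topic] else tags)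
    ["recoleta/trend"]
  -- [tag for tag in tags if not (tag in seen_tags or seen_tags.add(tag))]
  (tags.foldl
    (fun (p : PySem.Set String × List String) tag =>
      if PySem.Set.contains p.1 tag then p else (PySem.Set.add p.1 tag, p.2 ++ [tag]))
    (PySem.Set.empty, [])).2

-- ===== PORT B =====
-- allowed(ch) = ch.isalnum() or ch in {"_", "/"}
def pvAllowedB (c : Char) : Bool := PySem.Chars.isalnum c || c = '_' || c = '/'

-- itertools.groupby(raw, key=allowed), keeping only the True-keyed groups
def pvTokensB : List Char → List (List Char)
  | [] => []
  | c :: t =>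
      if pvAllowedB c then
        (c :: t.takeWhile pvAllowedB) :: pvTokensB (t.dropWhile pvAllowedB)
      else pvTokensB t
termination_by s => s.length
decreasing_by
  · exact Nat.lt_succ_of_le (List.length_dropWhile_le _ _)
  · exact Nat.lt_succ_self _

def pvSanitizeB (value : String) : String :=
  let raw := (PySem.Str.strip value).toList
  if raw = [] then ""
  else String.ofList (PySem.Chars.lower (PySem.Chars.join ['-'] (pvTokensB raw)))

def trend_tags_py_alt (topics : List String) : List String :=
  let tags := "recoleta/trend" ::
    (((topics.map pvSanitizeB).filter (fun n => n ≠ "")).map (fun n => "topic/" ++ n))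
  PySem.List.dedup tags

-- ===== PRECONDITION & SPEC =====
def Spec_trend_tags_py (topics : List String) (out : List String) : Prop := out = trend_tags_py_alt topics
instance (topics : List String) (out : List String) : Decidable (Spec_trend_tags_py topics out) := by unfold Spec_trend_tags_py; infer_instance

-- ===== CLAIM (what is proved, stated in full; the proofs are below) =====
def Claim_equal_trend_tags_py : Prop := ∀ (topics : List String), Dom_trend_tags_py topics → Spec_trend_tags_py topics (trend_tags_py topics)

-- ===== LEMMAS AND PROOFS =====

-- a char of the normalized string is "good" iff it is not a dash
def pvGood (c : Char) : Bool := !(c == '-')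

-- the predicate stripChars _ ['-'] strips by (definitionally ['-'].contains)
def pvIsDash (c : Char) : Bool := List.contains ['-'] c

lemma pvGood_dash : pvGood '-' = false := by simp [pvGood]

lemma pvGood_of_ne {c : Char} (h : ¬ c = '-') : pvGood c = true := by simp [pvGood]; exact h

lemma pvEq_dash_of_not_good {c : Char} (h : ¬ pvGood c = true) : c = '-' := by
  simpa [pvGood] using h

lemma pvIsDash_dash : pvIsDash '-' = true := by simp [pvIsDash]

lemma pvIsDash_of_ne {c : Char} (h : ¬ c = '-') : pvIsDash c = false := by
  simp [pvIsDash]; exact h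

-- runs of good chars of a dash-marked string, in order
def pvTokensD : List Char → List (List Char)
  | [] => []
  | c :: t =>
      if c = '-' then pvTokensD t
      else (c :: t.takeWhile pvGood) :: pvTokensD (t.dropWhile pvGood)
termination_by s => s.length
decreasing_by
  · exact Nat.lt_succ_self _
  · exact Nat.lt_succ_of_le (List.length_dropWhile_le _ _)

-- one leftmost-nonoverlapping pass of s.replace("--", "-")
def pvRep1 : List Char → List Char
  | a :: b :: t => if a = '-' ∧ b = '-' then '-' :: pvRep1 t else a :: pvRep1 (b :: t)
  | l => l

-- does the string contain "--"?
def pvHasDbl : List Char → Bool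
  | a :: b :: t => (a = '-' && b = '-') || pvHasDbl (b :: t)
  | _ => false

lemma pvRep1_go (fuel : Nat) : ∀ (l acc : List Char), l.length ≤ fuel →
    PySem.Chars.replace.go ['-', '-'] ['-'] fuel l acc = acc.reverse ++ pvRep1 l := by
  induction fuel with
  | zero =>
      intro l acc h
      have : l = [] := List.eq_nil_of_length_eq_zero (Nat.le_zero.mp h)
      subst this
      rw [PySem.Chars.replace.go.eq_def]; simp [pvRep1]
  | succ fuel ih =>
      intro l acc h
      match l with
      | [] => rw [PySem.Chars.replace.go.eq_def]; simp [pvRep1]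
      | [c] =>
          rw [PySem.Chars.replace.go.eq_def]
          simp only [List.isPrefixOf, Bool.and_false]
          rw [ih [] (c :: acc) (by simp)]
          simp [pvRep1]
      | a :: b :: t =>
          rw [PySem.Chars.replace.go.eq_def]
          by_cases hd : a = '-' ∧ b = '-'
          · obtain ⟨ha, hb⟩ := hd; subst ha; subst hb
            have hpre : ['-', '-'].isPrefixOf ('-' :: '-' :: t) = true := by
              simp [List.isPrefixOf]
            simp only [hpre, if_true]
            have ht : t.length ≤ fuel := by simp at h; omega
            show PySem.Chars.replace.go ['-', '-'] ['-'] fuel t ('-' :: acc) =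
              acc.reverse ++ pvRep1 ('-' :: '-' :: t)
            rw [ih t ('-' :: acc) ht]
            simp [pvRep1]
          · have hpre : ['-', '-'].isPrefixOf (a :: b :: t) = false := by
              simp only [List.isPrefixOf, Bool.and_true]
              rcases (not_and_or.mp hd) with hna | hnb
              · have : ('-' == a) = false := by simp; exact fun e => hna e.symm
                simp [this]
              · have : ('-' == b) = false := by simp; exact fun e => hnb e.symm
                simp [this]
            simp only [hpre, Bool.false_eq_true, if_false]
            have ht : (b :: t).length ≤ fuel := by simp at h; simp; omega
            rw [ih (b :: t) (a :: acc) ht]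
            rw [pvRep1, if_neg hd]
            simp

lemma pvReplace_eq_rep1 (s : List Char) :
    PySem.Chars.replace s ['-', '-'] ['-'] = pvRep1 s := by
  have h : PySem.Chars.replace s ['-', '-'] ['-'] =
      PySem.Chars.replace.go ['-', '-'] ['-'] s.length s [] := by
    rw [PySem.Chars.replace]; simp
  rw [h, pvRep1_go s.length s [] le_rfl]; simp

lemma pvInfix_iff_hasDbl (s : List Char) : ['-', '-'] <:+: s ↔ pvHasDbl s = true := by
  induction s with
  | nil => simp [pvHasDbl]
  | cons c t ih =>
      rw [List.infix_cons_iff]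
      match t with
      | [] =>
          simp only [pvHasDbl]
          constructor
          · rintro (h | h)
            · rcases h with ⟨r, hr⟩; simp at hr
            · exact absurd h (by simp)
          · intro h; cases h
      | b :: t' =>
          simp only [pvHasDbl]
          constructor
          · rintro (h | h)
            · rw [List.cons_prefix_cons] at h
              obtain ⟨hc, h2⟩ := h
              rw [List.cons_prefix_cons] at h2
              obtain ⟨hb, _⟩ := h2
              simp [← hc, ← hb]
            · simp [ih.mp h]
          · intro h
            simp only [Bool.or_eq_true, Bool.and_eq_true, decide_eq_true_eq] at h
            rcases h with ⟨hc, hb⟩ | h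
            · left; rw [hc, hb, List.cons_prefix_cons, List.cons_prefix_cons]
              exact ⟨rfl, rfl, List.nil_prefix⟩
            · right; exact ih.mpr h

lemma pvIsIn_eq_hasDbl (s : List Char) : PySem.Chars.isIn ['-', '-'] s = pvHasDbl s := by
  cases h : pvHasDbl s
  · rw [PySem.Chars.isIn_eq_false_iff]
    intro hinf
    rw [pvInfix_iff_hasDbl] at hinf
    simp [h] at hinf
  · rw [PySem.Chars.isIn_iff_infix, pvInfix_iff_hasDbl]
    exact h

lemma pvHasDbl_cons {a : Char} {l : List Char} (h : pvHasDbl (a :: l) = false) :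
    pvHasDbl l = false := by
  match l with
  | [] => simp [pvHasDbl]
  | b :: t =>
      simp only [pvHasDbl, Bool.or_eq_false_iff] at h
      exact h.2

lemma pvHasDbl_suffix {y : List Char} : ∀ (x : List Char),
    pvHasDbl (x ++ y) = false → pvHasDbl y = false := by
  intro x
  induction x with
  | nil => simp
  | cons a x' ih => intro h; exact ih (pvHasDbl_cons h)

lemma pvRep1_length_le (l : List Char) : (pvRep1 l).length ≤ l.length := by
  match l with
  | [] => simp [pvRep1]
  | [c] => simp [pvRep1]
  | a :: b :: t =>
      rw [pvRep1]
      split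
      · have := pvRep1_length_le t
        simp only [List.length_cons]; omega
      · have := pvRep1_length_le (b :: t)
        simp only [List.length_cons] at *; omega
  termination_by l.length
  decreasing_by all_goals simp only [List.length_cons]; omega

lemma pvRep1_length_lt (l : List Char) (h : pvHasDbl l = true) :
    (pvRep1 l).length < l.length := by
  match l with
  | [] => simp [pvHasDbl] at h
  | [c] => simp [pvHasDbl] at h
  | a :: b :: t =>
      rw [pvRep1]
      by_cases hd : a = '-' ∧ b = '-'
      · rw [if_pos hd]
        have := pvRep1_length_le t
        simp only [List.length_cons]; omega
      · rw [if_neg hd]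
        simp only [pvHasDbl, Bool.or_eq_true, Bool.and_eq_true, decide_eq_true_eq] at h
        rcases h with h | h
        · exact absurd h hd
        · have := pvRep1_length_lt (b :: t) h
          simp only [List.length_cons] at *; omega
  termination_by l.length
  decreasing_by simp only [List.length_cons]; omega

lemma pvRep1_good_head (c : Char) (t : List Char) (hc : ¬ c = '-') :
    pvRep1 (c :: t) = c :: pvRep1 t := by
  match t with
  | [] => simp [pvRep1]
  | b :: t' => rw [pvRep1, if_neg (by rintro ⟨h1, _⟩; exact hc h1)]

lemma pvRep1_dash_head (t : List Char) : ∃ y, pvRep1 ('-' :: t) = '-' :: y := by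
  match t with
  | [] => exact ⟨[], by simp [pvRep1]⟩
  | b :: t' =>
      rw [pvRep1]
      split
      · exact ⟨pvRep1 t', rfl⟩
      · exact ⟨pvRep1 (b :: t'), rfl⟩

-- rep1 passes an initial run of good chars through untouched
lemma pvRep1_good_run (t : List Char) :
    pvRep1 t = t.takeWhile pvGood ++ pvRep1 (t.dropWhile pvGood) := by
  match t with
  | [] => simp [pvRep1]
  | c :: t' =>
      by_cases hc : c = '-'
      · subst hc
        rw [List.takeWhile_cons_of_neg (by simp [pvGood_dash]),
          List.dropWhile_cons_of_neg (by simp [pvGood_dash])]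
        simp
      · rw [pvRep1_good_head c t' hc]
        rw [List.takeWhile_cons_of_pos (pvGood_of_ne hc),
          List.dropWhile_cons_of_pos (pvGood_of_ne hc)]
        rw [pvRep1_good_run t']
        simp
  termination_by t.length
  decreasing_by simp

lemma pvTokensD_rep1 (s : List Char) : pvTokensD (pvRep1 s) = pvTokensD s := by
  match s with
  | [] => simp [pvRep1]
  | c :: t =>
      by_cases hc : c = '-'
      · subst hc
        match t with
        | [] => simp [pvRep1]
        | b :: t' =>
            by_cases hb : b = '-'
            · subst hb
              rw [show pvRep1 ('-' :: '-' :: t') = '-' :: pvRep1 t' from by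
                rw [pvRep1, if_pos ⟨rfl, rfl⟩]]
              rw [pvTokensD, if_pos rfl, pvTokensD, if_pos rfl, pvTokensD, if_pos rfl]
              exact pvTokensD_rep1 t'
            · rw [show pvRep1 ('-' :: b :: t') = '-' :: pvRep1 (b :: t') from by
                rw [pvRep1, if_neg (by rintro ⟨_, h2⟩; exact hb h2)]]
              rw [pvTokensD, if_pos rfl, pvTokensD, if_pos rfl]
              exact pvTokensD_rep1 (b :: t')
      · rw [pvRep1_good_head c t hc]
        rw [pvTokensD, if_neg hc, pvTokensD, if_neg hc]
        have hrun := pvRep1_good_run t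
        set A := t.takeWhile pvGood with hA
        set u := t.dropWhile pvGood with hu
        clear_value A u
        have hAgood : ∀ x ∈ A, pvGood x = true := by
          intro x hx; rw [hA] at hx; exact List.mem_takeWhile_imp hx
        have hshape : u = [] ∨ ∃ u', u = '-' :: u' := by
          cases hu2 : u with
          | nil => exact Or.inl rfl
          | cons d u' =>
              right
              have hh := List.head?_dropWhile_not pvGood t
              rw [← hu, hu2] at hh
              simp only [List.head?_cons] at hh
              refine ⟨u', ?_⟩
              rw [pvEq_dash_of_not_good (c := d) (by simp [hh])]
        have htkA : A.takeWhile pvGood = A := List.takeWhile_eq_self_iff.mpr hAgood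
        have htk : (pvRep1 t).takeWhile pvGood = A := by
          rw [hrun, List.takeWhile_append, if_pos (by rw [htkA])]
          rcases hshape with h | ⟨u', h⟩
          · simp [h, pvRep1]
          · rcases pvRep1_dash_head u' with ⟨y, hy⟩
            rw [h, hy, List.takeWhile_cons_of_neg (by simp [pvGood_dash])]
            simp
        have hdr : (pvRep1 t).dropWhile pvGood = pvRep1 u := by
          rw [hrun, List.dropWhile_append,
            if_pos (by simp only [List.isEmpty_iff, List.dropWhile_eq_nil_iff]; exact hAgood)]
          rcases hshape with h | ⟨u', h⟩
          · simp [h, pvRep1]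
          · rcases pvRep1_dash_head u' with ⟨y, hy⟩
            rw [h, hy, List.dropWhile_cons_of_neg (by simp [pvGood_dash])]
        rw [htk, hdr, pvTokensD_rep1 u]
  termination_by s.length
  decreasing_by
    · simp only [List.length_cons]; omega
    · simp only [List.length_cons]; omega
    · simp only [List.length_cons]
      exact Nat.lt_succ_of_le (List.length_dropWhile_le _ _)

lemma pvStripChars_eq (s : List Char) :
    PySem.Chars.stripChars s ['-'] =
      ((s.dropWhile pvIsDash).reverse.dropWhile pvIsDash).reverse := rfl

lemma pvNoDash_dropWhile (l : List Char) (h : ∀ x ∈ l, ¬ x = '-') :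
    l.dropWhile pvIsDash = l := by
  match l with
  | [] => simp
  | c :: t =>
      rw [List.dropWhile_cons_of_neg (by simp [pvIsDash_of_ne (h c (by simp))])]

-- a string with no "--": strip('-') equals joining its good runs with single dashes
lemma pvStrip_nodbl (s : List Char) (h : pvHasDbl s = false) :
    PySem.Chars.stripChars s ['-'] = PySem.Chars.join ['-'] (pvTokensD s) := by
  match s with
  | [] => simp [pvTokensD, PySem.Chars.join_nil, pvStripChars_eq]
  | c :: t =>
    by_cases hc : c = '-'
    · subst hc
      rw [pvTokensD, if_pos rfl]
      match ht2 : t with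
      | [] => simp [pvTokensD, PySem.Chars.join_nil, pvStripChars_eq, pvIsDash]
      | g :: t' =>
          have hg : ¬ g = '-' := by
            simp only [pvHasDbl, Bool.or_eq_false_iff, Bool.and_eq_false_iff] at h
            intro he
            rcases h.1 with h1 | h1 <;> simp [he] at h1
          rw [← pvStrip_nodbl (g :: t') (pvHasDbl_cons h)]
          rw [pvStripChars_eq, pvStripChars_eq]
          rw [List.dropWhile_cons_of_pos (by simp [pvIsDash_dash])]
    · rw [pvTokensD, if_neg hc]
      obtain ⟨A, u, hA, hu, htd⟩ : ∃ A u, A = t.takeWhile pvGood ∧ u = t.dropWhile pvGood ∧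
          t = A ++ u := ⟨_, _, rfl, rfl, (List.takeWhile_append_dropWhile).symm⟩
      rw [← hA, ← hu]
      have hAgood : ∀ x ∈ A, pvGood x = true := by
        intro x hx; rw [hA] at hx; exact List.mem_takeWhile_imp hx
      have hAnd : ∀ x ∈ (c :: A), ¬ x = '-' := by
        intro x hx
        rcases List.mem_cons.mp hx with h1 | h1
        · rw [h1]; exact hc
        · intro he; have := hAgood x h1; rw [he, pvGood_dash] at this; cases this
      have hlstrip : (c :: t).dropWhile pvIsDash = c :: t :=
        List.dropWhile_cons_of_neg (by simp [pvIsDash_of_ne hc])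
      have hulen : u.length ≤ t.length := by rw [hu]; exact List.length_dropWhile_le _ _
      have hshape : u = [] ∨ ∃ u', u = '-' :: u' := by
        rcases hu4 : u with _ | ⟨d, u'⟩
        · exact Or.inl rfl
        · right
          have hh := List.head?_dropWhile_not pvGood t
          rw [← hu, hu4] at hh
          simp only [List.head?_cons] at hh
          exact ⟨u', by rw [pvEq_dash_of_not_good (c := d) (by simp [hh])]⟩
      rcases hshape with hu2 | ⟨u', hu2⟩
      · -- the whole string is one good run
        rw [hu2]
        have hsall : ∀ x ∈ (c :: t), ¬ x = '-' := by
          rw [htd, hu2]; simpa using hAnd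
        rw [pvStripChars_eq, pvNoDash_dropWhile _ hsall,
          pvNoDash_dropWhile _ (fun x hx => hsall x (List.mem_reverse.mp hx)),
          List.reverse_reverse]
        rw [htd, hu2, List.append_nil, pvTokensD, PySem.Chars.join_singleton]
      · rw [hu2, pvTokensD, if_pos rfl]
        rcases hu3 : u' with _ | ⟨g, u''⟩
        · -- single trailing dash
          rw [pvTokensD, PySem.Chars.join_singleton]
          rw [pvStripChars_eq, hlstrip]
          have hs : c :: t = (c :: A) ++ ['-'] := by rw [htd, hu2, hu3]; simp
          rw [hs, List.reverse_append]
          rw [show (['-'] : List Char).reverse = ['-'] from rfl]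
          rw [show (['-'] : List Char) ++ (c :: A).reverse = '-' :: (c :: A).reverse from rfl]
          rw [List.dropWhile_cons_of_pos (by simp [pvIsDash_dash])]
          rw [pvNoDash_dropWhile _ (fun x hx => hAnd x (List.mem_reverse.mp hx)),
            List.reverse_reverse]
        · -- internal single dash, then more string
          have hsuf : pvHasDbl ('-' :: g :: u'') = false := by
            apply pvHasDbl_suffix (c :: A)
            rw [show (c :: A) ++ '-' :: g :: u'' = c :: t from by rw [htd, hu2, hu3]; simp]
            exact h
          have hg : ¬ g = '-' := by
            simp only [pvHasDbl, Bool.or_eq_false_iff, Bool.and_eq_false_iff] at hsuf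
            intro he
            rcases hsuf.1 with h1 | h1 <;> simp [he] at h1
          have hrec := pvStrip_nodbl (g :: u'') (pvHasDbl_cons hsuf)
          -- left side
          rw [pvStripChars_eq, hlstrip]
          have hs : c :: t = (c :: A) ++ '-' :: g :: u'' := by rw [htd, hu2, hu3]; simp
          rw [hs, List.reverse_append, List.dropWhile_append]
          have hgm : g ∈ ('-' :: g :: u'' : List Char).reverse := by simp
          have hne : (('-' :: g :: u'' : List Char).reverse.dropWhile pvIsDash).isEmpty = false := by
            simp only [List.isEmpty_eq_false_iff, ne_eq, List.dropWhile_eq_nil_iff]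
            intro hall
            have := hall g hgm
            rw [pvIsDash_of_ne hg] at this; cases this
          rw [hne]
          simp only [Bool.false_eq_true, if_false]
          have hrev : ('-' :: g :: u'' : List Char).reverse = (g :: u'').reverse ++ ['-'] := by simp
          rw [hrev, List.dropWhile_append]
          have hne2 : ((g :: u'' : List Char).reverse.dropWhile pvIsDash).isEmpty = false := by
            simp only [List.isEmpty_eq_false_iff, ne_eq, List.dropWhile_eq_nil_iff]
            intro hall
            have := hall g (by simp)
            rw [pvIsDash_of_ne hg] at this; cases this
          rw [hne2]
          simp only [Bool.false_eq_true, if_false]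
          -- right side: join ((c::A) :: tokensD (g::u''))
          have htok : ∃ q rest, pvTokensD (g :: u'') = q :: rest := by
            rw [pvTokensD, if_neg hg]
            exact ⟨_, _, rfl⟩
          rcases htok with ⟨q, rest, hq⟩
          rw [hq, PySem.Chars.join_cons_cons, ← hq, ← hrec]
          rw [pvStripChars_eq]
          rw [show (g :: u'' : List Char).dropWhile pvIsDash = g :: u'' from
            List.dropWhile_cons_of_neg (by simp [pvIsDash_of_ne hg])]
          simp
  termination_by s.length
  decreasing_by
    · rw [ht2]; simp only [List.length_cons]; omega
    · -- recursive call on g :: u'', a strict suffix of u with u.length ≤ t.length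
      rw [hu2, hu3] at hulen
      simp only [List.length_cons] at *
      omega

lemma pvCentral (fuel : Nat) : ∀ (s : List Char), s.length ≤ fuel →
    PySem.Chars.stripChars (pvCollapseA fuel s) ['-'] = PySem.Chars.join ['-'] (pvTokensD s) := by
  induction fuel with
  | zero =>
      intro s h
      have : s = [] := List.eq_nil_of_length_eq_zero (Nat.le_zero.mp h)
      subst this
      simp [pvCollapseA, pvTokensD, PySem.Chars.join_nil, pvStripChars_eq]
  | succ fuel ih =>
      intro s h
      rw [pvCollapseA, pvIsIn_eq_hasDbl]
      cases hd : pvHasDbl s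
      · simp only [Bool.false_eq_true, if_false]
        exact pvStrip_nodbl s hd
      · simp only [if_true]
        rw [pvReplace_eq_rep1]
        have hlt := pvRep1_length_lt s hd
        rw [ih (pvRep1 s) (by omega)]
        rw [pvTokensD_rep1]

lemma pvAllowedB_dash : pvAllowedB '-' = false := by decide

lemma pvGood_mapDash (c : Char) : pvGood (pvMapDash c) = pvAllowedB c := by
  by_cases hb : pvAllowedB c = true
  · have hcd : ¬ c = '-' := by
      intro he; subst he; rw [pvAllowedB_dash] at hb; cases hb
    have ha : pvAllowedA c = true := by
      simp only [pvAllowedA, pvAllowedB, Bool.or_eq_true] at *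
      tauto
    rw [pvMapDash, if_pos ha, hb, pvGood_of_ne hcd]
  · have hmd : pvMapDash c = '-' := by
      rw [pvMapDash]
      split
      · rename_i ha
        simp only [pvAllowedA, pvAllowedB, Bool.or_eq_true, decide_eq_true_eq] at ha hb
        tauto
      · rfl
    rw [hmd, pvGood_dash]
    simp only [Bool.not_eq_true] at hb
    exact hb.symm

lemma pvMapDash_of_allowed (c : Char) (h : pvAllowedB c = true) : pvMapDash c = c := by
  rw [pvMapDash, if_pos]
  simp only [pvAllowedA, pvAllowedB, Bool.or_eq_true] at *
  tauto

lemma pvTokensD_map (raw : List Char) : pvTokensD (raw.map pvMapDash) = pvTokensB raw := by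
  match raw with
  | [] => simp [pvTokensD, pvTokensB]
  | c :: t =>
      have hcomp : (pvGood ∘ pvMapDash) = pvAllowedB := funext pvGood_mapDash
      by_cases hb : pvAllowedB c = true
      · have hcd : ¬ pvMapDash c = '-' := by
          intro he
          have := pvGood_mapDash c
          rw [he, pvGood_dash, hb] at this; cases this
        rw [List.map_cons, pvTokensD, if_neg hcd, pvTokensB, if_pos hb]
        rw [pvMapDash_of_allowed c hb]
        congr 1
        · congr 1
          rw [List.takeWhile_map, hcomp]
          rw [show (t.takeWhile pvAllowedB).map pvMapDash = (t.takeWhile pvAllowedB).map id from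
            List.map_congr_left (fun x hx => pvMapDash_of_allowed x (List.mem_takeWhile_imp hx)),
            List.map_id]
        · rw [List.dropWhile_map, hcomp]
          exact pvTokensD_map (t.dropWhile pvAllowedB)
      · have hmd : pvMapDash c = '-' := by
          have := pvGood_mapDash c
          rw [(Bool.not_eq_true _).mp hb] at this
          exact pvEq_dash_of_not_good (by rw [this]; simp)
        rw [List.map_cons, hmd, pvTokensD, if_pos rfl, pvTokensB, if_neg hb]
        exact pvTokensD_map t
  termination_by raw.length
  decreasing_by
    · exact Nat.lt_succ_of_le (List.length_dropWhile_le _ _)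
    · simp

lemma pvSanitize_eq (v : String) : pvSanitizeA v = pvSanitizeB v := by
  simp only [pvSanitizeA, pvSanitizeB]
  by_cases h : (PySem.Str.strip v).toList = []
  · simp [h]
  · rw [if_neg h, if_neg h]
    refine congrArg String.ofList (congrArg PySem.Chars.lower ?_)
    rw [pvCentral _ _ le_rfl, pvTokensD_map]

lemma pvDedup_fold (tags : List String) :
    (tags.foldl
      (fun (p : PySem.Set String × List String) tag =>
        if PySem.Set.contains p.1 tag then p else (PySem.Set.add p.1 tag, p.2 ++ [tag]))
      (PySem.Set.empty, [])).2 = PySem.List.dedup tags := by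
  have key : ∀ (l : List String) (s : List String),
      l.foldl
        (fun (p : PySem.Set String × List String) tag =>
          if PySem.Set.contains p.1 tag then p else (PySem.Set.add p.1 tag, p.2 ++ [tag]))
        (s, s) = (PySem.Set.update s l, PySem.Set.update s l) := by
    intro l
    induction l with
    | nil => intro s; simp [PySem.Set.update]
    | cons t rest ih =>
        intro s
        rw [List.foldl_cons]
        have hstep : (if PySem.Set.contains ((s, s) : PySem.Set String × List String).1 t
              then ((s, s) : PySem.Set String × List String)
              else (PySem.Set.add ((s, s) : PySem.Set String × List String).1 t,
                ((s, s) : PySem.Set String × List String).2 ++ [t]))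
            = ((PySem.Set.add s t : PySem.Set String), (PySem.Set.add s t : List String)) := by
          dsimp only
          rw [PySem.Set.add]
          split <;> simp_all
        rw [hstep, ih (PySem.Set.add s t)]
        simp [PySem.Set.update]
  rw [show (PySem.Set.empty : PySem.Set String) = ([] : List String) from rfl]
  rw [key tags []]
  rw [PySem.List.dedup_eq_ofList, PySem.Set.ofList_eq_foldl]
  simp [PySem.Set.update]

-- ===== VERDICT (by name: the statement is the Claim_ definition above) =====
set_option maxHeartbeats 1000000 in
theorem trend_tags_py_spec : Claim_equal_trend_tags_py := by
  intro topics _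
  unfold Spec_trend_tags_py
  simp only [trend_tags_py, trend_tags_py_alt]
  rw [pvDedup_fold]
  simp only [pvSanitize_eq]
  have hb : (fun (tags : List String) topic =>
        if pvSanitizeB topic ≠ "" then tags ++ ["topic/" ++ pvSanitizeB topic] else tags)
      = (fun (tags : List String) topic =>
        if (fun t => decide (pvSanitizeB t ≠ "")) topic = true
        then tags ++ [(fun t => "topic/" ++ pvSanitizeB t) topic] else tags) := by
    funext a b; simp
  rw [hb, PySem.List.foldl_append_if]
  congr 1
  rw [List.filter_map, List.map_map]
  rfl
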